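-- pv_equiv track=rewrite | github.com/ma-wolpers/blattwerk | app/core/blatt_kern_shared.py | annotate_standalone_subtasks
-- ===== SOURCE A (Python) =====
-- def annotate_standalone_subtasks(blocks):
--     """Reichert Top-Level-`subtask`-Blöcke mit Elternkontext und Zählung an."""
--     task_contexts = {}
--     current_task_key = None
--     task_key_counter = 0
--     subtask_total_by_task = {}
--     subtask_seen_by_task = {}
--
--     for block_type, options, _ in blocks:
--         if block_type == "task":
--             task_key_counter += 1
--             current_task_key = task_key_counter
--             task_contexts[current_task_key] = dict(options)
--             continue
--
--         if block_type == "subtask" and current_task_key is not None: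
--             subtask_total_by_task[current_task_key] = (
--                 subtask_total_by_task.get(current_task_key, 0) + 1
--             )
--
--     annotated_blocks = []
--     current_task_key = None
--
--     for block_type, options, content in blocks:
--         if block_type == "task":
--             current_task_key = (
--                 current_task_key + 1 if current_task_key is not None else 1
--             )
--             annotated_blocks.append((block_type, options, content))
--             continue
--
--         if block_type == "subtask" and current_task_key is not None:
--             parent_options = task_contexts.get(current_task_key, {})
--             updated_options = dict(options)
--             updated_options["_parent_work"] = parent_options.get("work", "single")
--             if parent_options.get("action") is not None:
--                 updated_options["_parent_action"] = parent_options.get("action")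
--
--             total = subtask_total_by_task.get(current_task_key, 0)
--             seen = subtask_seen_by_task.get(current_task_key, 0)
--             updated_options["_subtask_total"] = str(total)
--             updated_options["_subtask_index"] = str(seen)
--             subtask_seen_by_task[current_task_key] = seen + 1
--
--             if total > 1:
--                 updated_options["_subtask_letter"] = chr(ord("a") + seen)
--
--             annotated_blocks.append((block_type, updated_options, content))
--             continue
--
--         annotated_blocks.append((block_type, options, content))
--
--     return annotated_blocks
-- ===== SOURCE B (Python) =====
-- def annotate_standalone_subtasks(blocks):
--     """Single forward pass over task-delimited groups: buffer each task's blocks,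
--     flush with the group's subtask total when the group ends."""
--     out = []
--
--     def flush(parent, buf):
--         if parent is None:
--             out.extend(buf)
--             return
--         total = sum(1 for t, _, _ in buf if t == "subtask")
--         idx = 0
--         for t, opts, content in buf:
--             if t != "subtask":
--                 out.append((t, opts, content))
--                 continue
--             u = dict(opts)
--             u["_parent_work"] = parent.get("work", "single")
--             if parent.get("action") is not None:
--                 u["_parent_action"] = parent.get("action")
--             u["_subtask_total"] = str(total)
--             u["_subtask_index"] = str(idx)
--             if total > 1:
--                 u["_subtask_letter"] = chr(ord("a") + idx)
--             idx += 1
--             out.append((t, u, content))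
--
--     parent = None
--     buf = []
--     for block in blocks:
--         if block[0] == "task":
--             flush(parent, buf)
--             parent = dict(block[1])
--             buf = []
--             out.append(block)
--         else:
--             buf.append(block)
--     flush(parent, buf)
--     return out
-- ===== Notes on version B (the rewrite author's own statement) =====
-- stated objective: alternative
-- what changed: Replaced A's two full passes with keyed dicts (task_contexts / subtask_total_by_task / subtask_seen_by_task indexed by a task counter) by a single forward pass that buffers each task's group and flushes it with the locally counted subtask total when the group ends.
import Mathlib
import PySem

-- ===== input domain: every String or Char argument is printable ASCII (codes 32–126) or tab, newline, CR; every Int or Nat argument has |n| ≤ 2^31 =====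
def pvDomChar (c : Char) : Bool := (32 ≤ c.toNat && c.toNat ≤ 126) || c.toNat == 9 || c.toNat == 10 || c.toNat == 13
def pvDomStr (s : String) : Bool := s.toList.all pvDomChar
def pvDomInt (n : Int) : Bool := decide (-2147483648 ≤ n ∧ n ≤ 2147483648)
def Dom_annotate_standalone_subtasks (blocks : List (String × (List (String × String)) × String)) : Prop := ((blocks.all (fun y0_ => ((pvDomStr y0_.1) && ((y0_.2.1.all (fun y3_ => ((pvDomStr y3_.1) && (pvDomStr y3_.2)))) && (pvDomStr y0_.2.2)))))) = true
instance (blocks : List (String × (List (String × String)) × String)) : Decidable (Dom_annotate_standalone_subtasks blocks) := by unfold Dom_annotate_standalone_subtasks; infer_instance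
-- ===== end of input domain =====

-- B replaces A's two whole-list passes with keyed dicts by one forward pass over
-- task-delimited groups (buffer + flush); same output, same O(n) cost ("alternative").

abbrev PvBlk := String × (List (String × String)) × String
abbrev PvOpts := PySem.Dict String String

-- ===== PORT A =====
-- first pass: (task_key_counter, current_task_key, task_contexts, subtask_total_by_task)
def pvStepP1 : (Int × Option Int × PySem.Dict Int PvOpts × PySem.Dict Int Int) → PvBlk →
    (Int × Option Int × PySem.Dict Int PvOpts × PySem.Dict Int Int)
  | (cnt, cur, ctx, tot), b =>
    if b.1 == "task" then
      (cnt + 1, some (cnt + 1), ctx.insert (cnt + 1) (PySem.Dict.ofList b.2.1), tot)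
    else
      match cur with
      | some k => if b.1 == "subtask" then (cnt, cur, ctx, tot.insert k (tot.getD k 0 + 1))
                  else (cnt, some k, ctx, tot)
      | none => (cnt, none, ctx, tot)

-- second pass: (current_task_key, subtask_seen_by_task, annotated_blocks)
def pvStepP2 (ctx : PySem.Dict Int PvOpts) (tot : PySem.Dict Int Int) :
    (Option Int × PySem.Dict Int Int × List PvBlk) → PvBlk →
    (Option Int × PySem.Dict Int Int × List PvBlk)
  | (cur, seenD, acc), b =>
    if b.1 == "task" then
      ((match cur with | some k => some (k + 1) | none => some 1), seenD, acc ++ [b])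
    else
      match cur with
      | some k =>
        if b.1 == "subtask" then
          let parent := ctx.getD k PySem.Dict.empty
          let u1 := (PySem.Dict.ofList b.2.1).insert "_parent_work" (parent.getD "work" "single")
          let u2 := match parent.get? "action" with | some a => u1.insert "_parent_action" a | none => u1
          let total := tot.getD k 0
          let seen := seenD.getD k 0
          let u3 := (u2.insert "_subtask_total" (PySem.Int.toStr total)).insert "_subtask_index" (PySem.Int.toStr seen)
          let u4 := if total > 1 then u3.insert "_subtask_letter" (String.ofList [Char.ofNat (97 + seen.toNat)]) else u3
          (some k, seenD.insert k (seen + 1), acc ++ [(b.1, u4.items, b.2.2)])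
        else (some k, seenD, acc ++ [b])
      | none => (none, seenD, acc ++ [b])

def annotate_standalone_subtasks (blocks : List (String × (List (String × String)) × String)) : List (String × (List (String × String)) × String) :=
  let p1 := blocks.foldl pvStepP1 (0, none, PySem.Dict.empty, PySem.Dict.empty)
  (blocks.foldl (pvStepP2 p1.2.2.1 p1.2.2.2) (none, PySem.Dict.empty, [])).2.2

-- ===== PORT B =====
-- flush inner loop: state (idx, out)
def pvFlushStep (p : PvOpts) (total : Int) : (Int × List PvBlk) → PvBlk → (Int × List PvBlk)
  | (idx, out), b =>
    if b.1 != "subtask" then (idx, out ++ [b])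
    else
      let u1 := (PySem.Dict.ofList b.2.1).insert "_parent_work" (p.getD "work" "single")
      let u2 := match p.get? "action" with | some a => u1.insert "_parent_action" a | none => u1
      let u3 := (u2.insert "_subtask_total" (PySem.Int.toStr total)).insert "_subtask_index" (PySem.Int.toStr idx)
      let u4 := if total > 1 then u3.insert "_subtask_letter" (String.ofList [Char.ofNat (97 + idx.toNat)]) else u3
      (idx + 1, out ++ [(b.1, u4.items, b.2.2)])

def pvFlush (parent : Option PvOpts) (buf out : List PvBlk) : List PvBlk :=
  match parent with
  | none => out ++ buf
  | some p =>
    let total : Int := ((buf.filter (fun b => b.1 == "subtask")).length : Int)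
    (buf.foldl (pvFlushStep p total) (0, out)).2

-- main loop: state (parent, buf, out)
def pvStepB : (Option PvOpts × List PvBlk × List PvBlk) → PvBlk → (Option PvOpts × List PvBlk × List PvBlk)
  | (parent, buf, out), b =>
    if b.1 == "task" then (some (PySem.Dict.ofList b.2.1), [], pvFlush parent buf out ++ [b])
    else (parent, buf ++ [b], out)

def annotate_standalone_subtasks_alt (blocks : List (String × (List (String × String)) × String)) : List (String × (List (String × String)) × String) :=
  let fin := blocks.foldl pvStepB (none, [], [])
  pvFlush fin.1 fin.2.1 fin.2.2

-- ===== PRECONDITION & SPEC =====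
def Spec_annotate_standalone_subtasks (blocks : List (String × (List (String × String)) × String)) (out : List (String × (List (String × String)) × String)) : Prop := out = annotate_standalone_subtasks_alt blocks
instance (blocks : List (String × (List (String × String)) × String)) (out : List (String × (List (String × String)) × String)) : Decidable (Spec_annotate_standalone_subtasks blocks out) := by unfold Spec_annotate_standalone_subtasks; infer_instance

-- ===== CLAIM (what is proved, stated in full; the proofs are below) =====
def Claim_equal_annotate_standalone_subtasks : Prop := ∀ (blocks : List (String × (List (String × String)) × String)), Dom_annotate_standalone_subtasks blocks → Spec_annotate_standalone_subtasks blocks (annotate_standalone_subtasks blocks)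

-- ===== LEMMAS AND PROOFS =====

-- the annotated form of one subtask block (the shared inner snippet of both Pythons)
def pvAnn (p : PvOpts) (total seen : Int) (b : PvBlk) : PvBlk :=
  let u1 := (PySem.Dict.ofList b.2.1).insert "_parent_work" (p.getD "work" "single")
  let u2 := match p.get? "action" with | some a => u1.insert "_parent_action" a | none => u1
  let u3 := (u2.insert "_subtask_total" (PySem.Int.toStr total)).insert "_subtask_index" (PySem.Int.toStr seen)
  let u4 := if total > 1 then u3.insert "_subtask_letter" (String.ofList [Char.ofNat (97 + seen.toNat)]) else u3
  (b.1, u4.items, b.2.2)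

-- annotate one group (total fixed, running index)
def pvAnnGroup (p : PvOpts) (total : Int) : Int → List PvBlk → List PvBlk
  | _, [] => []
  | idx, b :: r =>
    if b.1 == "subtask" then pvAnn p total idx b :: pvAnnGroup p total (idx + 1) r
    else b :: pvAnnGroup p total idx r

def pvSubCount : List PvBlk → Int
  | [] => 0
  | b :: r => (if b.1 == "subtask" then 1 else 0) + pvSubCount r

def pvSubsBT : List PvBlk → Int
  | [] => 0
  | b :: r => if b.1 == "task" then 0 else (if b.1 == "subtask" then 1 else 0) + pvSubsBT r

def pvFinish (st : Option PvOpts × List PvBlk × List PvBlk) : List PvBlk :=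
  pvFlush st.1 st.2.1 st.2.2

lemma pvSubCount_eq_filter (buf : List PvBlk) :
    pvSubCount buf = ((buf.filter (fun b => b.1 == "subtask")).length : Int) := by
  induction buf with
  | nil => rfl
  | cons b r ih =>
    by_cases hb : b.1 = "subtask"
    · simp [pvSubCount, hb, ih]; omega
    · simp [pvSubCount, hb, ih]

lemma pvSubCount_append (buf : List PvBlk) (b : PvBlk) :
    pvSubCount (buf ++ [b]) = pvSubCount buf + (if b.1 == "subtask" then 1 else 0) := by
  induction buf with
  | nil => simp [pvSubCount]
  | cons c r ih => simp [pvSubCount, ih]; ring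

lemma pvFlushAux (buf : List PvBlk) (p : PvOpts) (total : Int) :
    ∀ (i : Int) (out : List PvBlk),
    (buf.foldl (pvFlushStep p total) (i, out)).2 = out ++ pvAnnGroup p total i buf := by
  induction buf with
  | nil => intro i out; simp [pvAnnGroup]
  | cons b r ih =>
    intro i out
    by_cases hb : b.1 = "subtask"
    · simp [List.foldl_cons, pvFlushStep, pvAnnGroup, hb, ih, pvAnn]
    · simp [List.foldl_cons, pvFlushStep, pvAnnGroup, hb, ih]

lemma pvFlush_some (p : PvOpts) (buf out : List PvBlk) :
    pvFlush (some p) buf out = out ++ pvAnnGroup p (pvSubCount buf) 0 buf := by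
  rw [pvFlush, ← pvSubCount_eq_filter, pvFlushAux]

lemma pvAnnGroup_append (p : PvOpts) (t : Int) (b : PvBlk) :
    ∀ (buf : List PvBlk) (i : Int),
    pvAnnGroup p t i (buf ++ [b]) =
      pvAnnGroup p t i buf ++
        (if b.1 == "subtask" then [pvAnn p t (i + pvSubCount buf) b] else [b]) := by
  intro buf
  induction buf with
  | nil => intro i; by_cases hb : b.1 = "subtask" <;> simp [pvAnnGroup, pvSubCount, hb]
  | cons c r ih =>
    intro i
    by_cases hc : c.1 = "subtask"
    · have : i + pvSubCount (c :: r) = (i + 1) + pvSubCount r := by simp [pvSubCount, hc]; ring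
      simp [pvAnnGroup, hc, ih, this]
    · simp [pvAnnGroup, hc, ih, pvSubCount]

lemma pvP1_ctx_getD :
    ∀ (l : List PvBlk) (k j : Int) (ctx : PySem.Dict Int PvOpts) (tot : PySem.Dict Int Int),
    j ≤ k →
    ((l.foldl pvStepP1 (k, some k, ctx, tot)).2.2.1).getD j PySem.Dict.empty
      = ctx.getD j PySem.Dict.empty := by
  intro l
  induction l with
  | nil => intro k j ctx tot _; rfl
  | cons b r ih =>
    intro k j ctx tot hj
    by_cases hb : b.1 = "task"
    · rw [List.foldl_cons]
      have : pvStepP1 (k, some k, ctx, tot) b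
          = (k + 1, some (k + 1), ctx.insert (k + 1) (PySem.Dict.ofList b.2.1), tot) := by
        simp [pvStepP1, hb]
      rw [this, ih _ _ _ _ (by omega)]
      rw [PySem.Dict.getD_insert]
      simp [show j ≠ k + 1 by omega]
    · by_cases hs : b.1 = "subtask"
      · rw [List.foldl_cons]
        have : pvStepP1 (k, some k, ctx, tot) b
            = (k, some k, ctx, tot.insert k (tot.getD k 0 + 1)) := by simp [pvStepP1, hb, hs]
        rw [this, ih _ _ _ _ hj]
      · rw [List.foldl_cons]
        have : pvStepP1 (k, some k, ctx, tot) b = (k, some k, ctx, tot) := by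
          simp [pvStepP1, hb, hs]
        rw [this, ih _ _ _ _ hj]

lemma pvP1_tot_getD :
    ∀ (l : List PvBlk) (k j : Int) (ctx : PySem.Dict Int PvOpts) (tot : PySem.Dict Int Int),
    j ≤ k →
    ((l.foldl pvStepP1 (k, some k, ctx, tot)).2.2.2).getD j 0
      = tot.getD j 0 + (if j = k then pvSubsBT l else 0) := by
  intro l
  induction l with
  | nil => intro k j ctx tot _; simp [pvSubsBT]
  | cons b r ih =>
    intro k j ctx tot hj
    by_cases hb : b.1 = "task"
    · rw [List.foldl_cons]
      have : pvStepP1 (k, some k, ctx, tot) b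
          = (k + 1, some (k + 1), ctx.insert (k + 1) (PySem.Dict.ofList b.2.1), tot) := by
        simp [pvStepP1, hb]
      rw [this, ih _ _ _ _ (by omega)]
      simp [pvSubsBT, hb, show j ≠ k + 1 by omega]
    · by_cases hs : b.1 = "subtask"
      · rw [List.foldl_cons]
        have : pvStepP1 (k, some k, ctx, tot) b
            = (k, some k, ctx, tot.insert k (tot.getD k 0 + 1)) := by simp [pvStepP1, hb, hs]
        rw [this, ih _ _ _ _ hj, PySem.Dict.getD_insert]
        simp [pvSubsBT, hb, hs]
        split_ifs with h1 <;> simp [h1] <;> ring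
      · rw [List.foldl_cons]
        have : pvStepP1 (k, some k, ctx, tot) b = (k, some k, ctx, tot) := by
          simp [pvStepP1, hb, hs]
        rw [this, ih _ _ _ _ hj]
        simp [pvSubsBT, hb, hs]

lemma pvMain :
    ∀ (l : List PvBlk) (k : Int) (ctx : PySem.Dict Int PvOpts) (tot seenD : PySem.Dict Int Int)
      (buf out : List PvBlk),
    (∀ j, k < j → tot.contains j = false) →
    (∀ j, k < j → seenD.contains j = false) →
    seenD.getD k 0 = pvSubCount buf →
    tot.getD k 0 = pvSubCount buf →
    (l.foldl
        (pvStepP2 (l.foldl pvStepP1 (k, some k, ctx, tot)).2.2.1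
                  (l.foldl pvStepP1 (k, some k, ctx, tot)).2.2.2)
        (some k, seenD,
          out ++ pvAnnGroup (((l.foldl pvStepP1 (k, some k, ctx, tot)).2.2.1).getD k PySem.Dict.empty)
                            (((l.foldl pvStepP1 (k, some k, ctx, tot)).2.2.2).getD k 0) 0 buf)).2.2
      = pvFinish (l.foldl pvStepB
          (some (((l.foldl pvStepP1 (k, some k, ctx, tot)).2.2.1).getD k PySem.Dict.empty), buf, out)) := by

  intro l
  induction l with
  | nil =>
    intro k ctx tot seenD buf out _ _ _ ht
    simp only [List.foldl_nil, pvFinish, pvFlush_some]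
    rw [ht]
  | cons b r ih =>
    intro k ctx tot seenD buf out hT hS hs ht
    by_cases hb : b.1 = "task"
    · have hstep1 : pvStepP1 (k, some k, ctx, tot) b
          = (k + 1, some (k + 1), ctx.insert (k + 1) (PySem.Dict.ofList b.2.1), tot) := by
        simp [pvStepP1, hb]
      simp only [List.foldl_cons, hstep1]
      simp only [pvStepP2, pvStepB, hb, BEq.rfl, if_true]
      have hq : ((r.foldl pvStepP1 (k + 1, some (k + 1), ctx.insert (k + 1) (PySem.Dict.ofList b.2.1), tot)).2.2.1).getD (k + 1) PySem.Dict.empty = PySem.Dict.ofList b.2.1 := by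
        rw [pvP1_ctx_getD r (k+1) (k+1) _ _ le_rfl, PySem.Dict.getD_insert]
        simp
      have htk : ((r.foldl pvStepP1 (k + 1, some (k + 1), ctx.insert (k + 1) (PySem.Dict.ofList b.2.1), tot)).2.2.2).getD k 0 = pvSubCount buf := by
        rw [pvP1_tot_getD r (k+1) k _ _ (by omega)]
        simp [show k ≠ k + 1 by omega, ht]
      have key := ih (k+1) (ctx.insert (k + 1) (PySem.Dict.ofList b.2.1)) tot seenD []
        (pvFlush (some (((r.foldl pvStepP1 (k + 1, some (k + 1), ctx.insert (k + 1) (PySem.Dict.ofList b.2.1), tot)).2.2.1).getD k PySem.Dict.empty)) buf out ++ [b])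
        (fun j hj => hT j (by omega)) (fun j hj => hS j (by omega))
        (by rw [PySem.Dict.getD_of_not_contains _ 0 (hS (k+1) (by omega))]; rfl)
        (by rw [PySem.Dict.getD_of_not_contains _ 0 (hT (k+1) (by omega))]; rfl)
      rw [hq] at key
      rw [htk, pvFlush_some] at *
      simpa [pvAnnGroup, List.append_assoc] using key
    · by_cases hsub : b.1 = "subtask"
      · have hstep1 : pvStepP1 (k, some k, ctx, tot) b
            = (k, some k, ctx, tot.insert k (tot.getD k 0 + 1)) := by
          simp [pvStepP1, hsub]
        simp only [List.foldl_cons, hstep1]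
        simp only [pvStepP2, pvStepB, beq_iff_eq, hb, hsub, ite_false]
        have key := ih k ctx (tot.insert k (tot.getD k 0 + 1))
          (seenD.insert k (seenD.getD k 0 + 1)) (buf ++ [b]) out
          (fun j hj => by rw [PySem.Dict.contains_insert]; simp [show ¬ (j = k) by omega, hT j hj])
          (fun j hj => by rw [PySem.Dict.contains_insert]; simp [show ¬ (j = k) by omega, hS j hj])
          (by rw [PySem.Dict.getD_insert_self, pvSubCount_append, hs]; simp [hsub])
          (by rw [PySem.Dict.getD_insert_self, pvSubCount_append, ht]; simp [hsub])
        rw [pvAnnGroup_append] at key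
        simpa [hsub, hs, pvAnn, List.append_assoc] using key
      · have hstep1 : pvStepP1 (k, some k, ctx, tot) b = (k, some k, ctx, tot) := by
          simp [pvStepP1, hb, hsub]
        simp only [List.foldl_cons, hstep1]
        simp only [pvStepP2, pvStepB, beq_iff_eq, hb, hsub, ite_false]
        have key := ih k ctx tot seenD (buf ++ [b]) out hT hS
          (by rw [pvSubCount_append, hs]; simp [hsub])
          (by rw [pvSubCount_append, ht]; simp [hsub])
        rw [pvAnnGroup_append] at key
        simpa [hsub, List.append_assoc] using key

lemma pvPre :
    ∀ (l : List PvBlk) (buf out : List PvBlk),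
    (l.foldl
        (pvStepP2 (l.foldl pvStepP1 (0, none, PySem.Dict.empty, PySem.Dict.empty)).2.2.1
                  (l.foldl pvStepP1 (0, none, PySem.Dict.empty, PySem.Dict.empty)).2.2.2)
        (none, PySem.Dict.empty, out ++ buf)).2.2
      = pvFinish (l.foldl pvStepB (none, buf, out)) := by

  intro l
  induction l with
  | nil => intro buf out; rfl
  | cons b r ih =>
    intro buf out
    by_cases hb : b.1 = "task"
    · have hstep1 : pvStepP1 ((0 : Int), (none : Option Int), (PySem.Dict.empty : PySem.Dict Int PvOpts), (PySem.Dict.empty : PySem.Dict Int Int)) b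
          = (1, some 1, PySem.Dict.empty.insert 1 (PySem.Dict.ofList b.2.1), PySem.Dict.empty) := by
        simp [pvStepP1, hb]
      simp only [List.foldl_cons, hstep1]
      simp only [pvStepP2, pvStepB, hb, BEq.rfl, if_true]
      have hq : ((r.foldl pvStepP1 ((1:Int), some 1, PySem.Dict.empty.insert 1 (PySem.Dict.ofList b.2.1), (PySem.Dict.empty : PySem.Dict Int Int))).2.2.1).getD 1 PySem.Dict.empty = PySem.Dict.ofList b.2.1 := by
        rw [pvP1_ctx_getD r 1 1 _ _ le_rfl, PySem.Dict.getD_insert]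
        simp
      have key := pvMain r 1 (PySem.Dict.empty.insert 1 (PySem.Dict.ofList b.2.1))
        PySem.Dict.empty PySem.Dict.empty [] (out ++ buf ++ [b])
        (fun j _ => PySem.Dict.contains_empty _) (fun j _ => PySem.Dict.contains_empty _)
        (by simp [pvSubCount]) (by simp [pvSubCount])
      rw [hq] at key
      simpa [pvAnnGroup, pvFlush, List.append_assoc] using key
    · have hstep1 : pvStepP1 ((0 : Int), (none : Option Int), (PySem.Dict.empty : PySem.Dict Int PvOpts), (PySem.Dict.empty : PySem.Dict Int Int)) b
          = (0, none, PySem.Dict.empty, PySem.Dict.empty) := by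
        simp [pvStepP1, hb]
      simp only [List.foldl_cons, hstep1]
      simp only [pvStepP2, pvStepB, beq_iff_eq, hb, ite_false]
      have key := ih (buf ++ [b]) out
      simpa [List.append_assoc] using key


-- ===== VERDICT (by name: the statement is the Claim_ definition above) =====
theorem annotate_standalone_subtasks_spec : Claim_equal_annotate_standalone_subtasks := by
  intro blocks _
  unfold Spec_annotate_standalone_subtasks annotate_standalone_subtasks annotate_standalone_subtasks_alt
  have := pvPre blocks [] []
  simpa [pvFinish] using this
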